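-- pv_equiv track=rewrite | github.com/seshadri-c/Neural-Unsupervised-Paraphrasing | prepare_dataset.py | clean_unnecessary_spaces
-- ===== SOURCE A (Python) =====
-- def clean_unnecessary_spaces(out_string):
--     if not isinstance(out_string, str):
--         out_string = str(out_string)
--     occurance = [' .', ' ?', ' !', ' ,', " ' ", " n't", " 'm", " 's", " 've", " 're"]
--     replacement = ['.', '?', '!', ',', "'", "n't", "'m", "'s", "'ve", "'re"]
--     for i in range(len(occurance)):
--     	out_string = out_string.replace(occurance[i], replacement[i])
--     return out_string
-- ===== SOURCE B (Python) =====
-- def clean_unnecessary_spaces(out_string):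
--     if not isinstance(out_string, str):
--         out_string = str(out_string)
--     s = out_string
--     # Stage 1: one left-to-right scan applying the space+punctuation rules and the space-quote-space rule.
--     # The quote rule is suppressed when its trailing space starts a punctuation pattern, because the
--     # punctuation passes run first in the sequential-replace semantics being implemented.
--     out = []
--     i, n = 0, len(s)
--     while i < n:
--         if s[i] == ' ' and i + 1 < n and s[i + 1] in ".?!,":
--             out.append(s[i + 1]); i += 2
--         elif (s[i] == ' ' and i + 2 < n and s[i + 1] == "'" and s[i + 2] == ' '
--               and not (i + 3 < n and s[i + 3] in ".?!,")):
--             out.append("'"); i += 3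
--         else:
--             out.append(s[i]); i += 1
--     t = ''.join(out)
--     # Stage 2: one scan applying the contraction rules (mutually non-overlapping).
--     out = []
--     i, n = 0, len(t)
--     while i < n:
--         if t[i] == ' ' and t[i + 1:i + 4] == "n't":
--             out.append("n't"); i += 4
--         elif t[i] == ' ' and t[i + 1:i + 3] in ("'m", "'s"):
--             out.append(t[i + 1:i + 3]); i += 3
--         elif t[i] == ' ' and t[i + 1:i + 4] in ("'ve", "'re"):
--             out.append(t[i + 1:i + 4]); i += 4
--         else:
--             out.append(t[i]); i += 1
--     return ''.join(out)
-- ===== Notes on version B (the rewrite author's own statement) =====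
-- stated objective: alternative
-- what changed: Replaces the ten sequential global str.replace passes by two explicit left-to-right scans over the string: one scan fuses the four punctuation rules and the space-quote-space rule (with an explicit priority check where their matches overlap), a second scan fuses the five mutually non-overlapping contraction rules; trades C-level replace passes for a single-pass rule automaton.
import Mathlib
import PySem

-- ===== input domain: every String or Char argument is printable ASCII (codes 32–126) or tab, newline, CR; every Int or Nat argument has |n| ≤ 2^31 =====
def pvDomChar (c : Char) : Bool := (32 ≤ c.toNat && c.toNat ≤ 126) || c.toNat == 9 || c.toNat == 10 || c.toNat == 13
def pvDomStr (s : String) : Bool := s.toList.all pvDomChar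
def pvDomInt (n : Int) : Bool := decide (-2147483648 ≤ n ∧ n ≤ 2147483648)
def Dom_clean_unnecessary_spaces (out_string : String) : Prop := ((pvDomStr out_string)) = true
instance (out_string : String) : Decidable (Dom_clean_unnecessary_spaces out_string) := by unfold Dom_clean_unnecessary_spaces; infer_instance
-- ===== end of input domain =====

-- B replaces A's ten sequential global replace passes by two single left-to-right scans
-- (punctuation + " ' " rules, then contraction rules); A's isinstance guard never fires for a
-- str argument (the type here), so both ports omit it.

-- ===== PORT A =====
-- A: two parallel literal lists, an index loop over range(len(occurance)), str.replace per index.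
def clean_unnecessary_spaces (out_string : String) : String :=
  let occurance : List String := [" .", " ?", " !", " ,", " ' ", " n't", " 'm", " 's", " 've", " 're"]
  let replacement : List String := [".", "?", "!", ",", "'", "n't", "'m", "'s", "'ve", "'re"]
  (PySem.List.pyRange 0 (occurance.length : Int) 1).foldl
    (fun s i => PySem.Str.replace s (PySem.List.pyGetD occurance i "") (PySem.List.pyGetD replacement i ""))
    out_string

-- ===== PORT B =====
-- B stage 1: one scan for the four punctuation rules and the space-quote-space rule; the latter is
-- suppressed when its trailing space starts a punctuation pattern (those rules have priority).
def pvScan1 : List Char → List Char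
  | ' ' :: '.' :: t => '.' :: pvScan1 t
  | ' ' :: '?' :: t => '?' :: pvScan1 t
  | ' ' :: '!' :: t => '!' :: pvScan1 t
  | ' ' :: ',' :: t => ',' :: pvScan1 t
  | ' ' :: '\'' :: ' ' :: '.' :: t => ' ' :: pvScan1 ('\'' :: ' ' :: '.' :: t)
  | ' ' :: '\'' :: ' ' :: '?' :: t => ' ' :: pvScan1 ('\'' :: ' ' :: '?' :: t)
  | ' ' :: '\'' :: ' ' :: '!' :: t => ' ' :: pvScan1 ('\'' :: ' ' :: '!' :: t)
  | ' ' :: '\'' :: ' ' :: ',' :: t => ' ' :: pvScan1 ('\'' :: ' ' :: ',' :: t)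
  | ' ' :: '\'' :: ' ' :: t => '\'' :: pvScan1 t
  | c :: t => c :: pvScan1 t
  | [] => []
termination_by l => l.length

def pvScan2 : List Char → List Char
  | ' ' :: 'n' :: '\'' :: 't' :: t => 'n' :: '\'' :: 't' :: pvScan2 t
  | ' ' :: '\'' :: 'm' :: t => '\'' :: 'm' :: pvScan2 t
  | ' ' :: '\'' :: 's' :: t => '\'' :: 's' :: pvScan2 t
  | ' ' :: '\'' :: 'v' :: 'e' :: t => '\'' :: 'v' :: 'e' :: pvScan2 t
  | ' ' :: '\'' :: 'r' :: 'e' :: t => '\'' :: 'r' :: 'e' :: pvScan2 t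
  | c :: t => c :: pvScan2 t
  | [] => []

def clean_unnecessary_spaces_alt (out_string : String) : String :=
  String.ofList (pvScan2 (pvScan1 out_string.toList))

-- ===== PRECONDITION & SPEC =====
def Spec_clean_unnecessary_spaces (out_string : String) (out : String) : Prop := out = clean_unnecessary_spaces_alt out_string
instance (out_string : String) (out : String) : Decidable (Spec_clean_unnecessary_spaces out_string out) := by unfold Spec_clean_unnecessary_spaces; infer_instance

-- ===== CLAIM (what is proved, stated in full; the proofs are below) =====
def Claim_equal_clean_unnecessary_spaces : Prop := ∀ (out_string : String), Dom_clean_unnecessary_spaces out_string → Spec_clean_unnecessary_spaces out_string (clean_unnecessary_spaces out_string)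

-- ===== LEMMAS AND PROOFS =====

def pvRep (p r : List Char) : List Char → List Char
  | [] => []
  | c :: t => if p.isPrefixOf (c :: t) then r ++ pvRep p r (t.drop (p.length - 1)) else c :: pvRep p r t
termination_by l => l.length
decreasing_by
  · simp [List.length_drop]
  · simp

theorem pvRepGoAcc (old new : List Char) : ∀ (n : Nat) (l acc : List Char),
    PySem.Chars.replace.go old new n l acc = acc.reverse ++ PySem.Chars.replace.go old new n l [] := by
  intro n
  induction n with
  | zero => intro l acc; simp [PySem.Chars.replace.go]
  | succ n ih =>
    intro l acc
    cases l with
    | nil => simp [PySem.Chars.replace.go]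
    | cons c t =>
      by_cases hp : old.isPrefixOf (c :: t) = true
      · simp only [PySem.Chars.replace.go, hp, if_pos]
        simp only [List.append_nil]
        rw [ih ((c :: t).drop old.length) (new.reverse ++ acc), ih ((c :: t).drop old.length) new.reverse]
        simp
      · simp only [PySem.Chars.replace.go, hp, if_neg, Bool.false_eq_true, not_false_iff]
        rw [ih t (c :: acc), ih t [c]]
        simp

theorem pvGoEq (p r : List Char) (hp : p ≠ []) : ∀ (n : Nat) (l : List Char), l.length ≤ n →
    PySem.Chars.replace.go p r n l [] = pvRep p r l := by
  intro n
  induction n with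
  | zero =>
    intro l hl
    have : l = [] := by cases l <;> simp_all
    subst this; simp [PySem.Chars.replace.go, pvRep]
  | succ n ih =>
    intro l hl
    cases l with
    | nil => simp [PySem.Chars.replace.go, pvRep]
    | cons c t =>
      by_cases hpre : p.isPrefixOf (c :: t) = true
      · simp only [PySem.Chars.replace.go, hpre, if_pos]
        rw [show r.reverse ++ ([] : List Char) = r.reverse by simp, pvRepGoAcc p r n ((c :: t).drop p.length) r.reverse]
        have hplen : ∃ k, p.length = k + 1 := by cases p <;> simp_all
        obtain ⟨k, hk⟩ := hplen
        have hdrop : (c :: t).drop p.length = t.drop (p.length - 1) := by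
          rw [hk]; simp
        rw [hdrop, ih (t.drop (p.length - 1)) (by simp at hl ⊢; omega)]
        simp [pvRep, hpre]
      · simp only [PySem.Chars.replace.go, hpre, if_neg, Bool.false_eq_true, not_false_iff]
        rw [pvRepGoAcc p r n t [c], ih t (by simp at hl ⊢; omega)]
        simp [pvRep, hpre]

theorem pvRepEq (p r : List Char) (hp : p ≠ []) (l : List Char) :
    PySem.Chars.replace l p r = pvRep p r l := by
  unfold PySem.Chars.replace
  rw [if_neg (by simp [List.isEmpty_iff, hp])]
  exact pvGoEq p r hp l.length l le_rfl


def pvC1 (l : List Char) : List Char :=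
  pvRep [' ', '\'', ' '] ['\'']
    (pvRep [' ', ','] [',']
      (pvRep [' ', '!'] ['!']
        (pvRep [' ', '?'] ['?']
          (pvRep [' ', '.'] ['.'] l))))

def pvC2 (l : List Char) : List Char :=
  pvRep [' ', '\'', 'r', 'e'] ['\'', 'r', 'e']
    (pvRep [' ', '\'', 'v', 'e'] ['\'', 'v', 'e']
      (pvRep [' ', '\'', 's'] ['\'', 's']
        (pvRep [' ', '\'', 'm'] ['\'', 'm']
          (pvRep [' ', 'n', '\'', 't'] ['n', '\'', 't'] l))))

theorem pvRep_miss (p r : List Char) (c : Char) (t : List Char)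
    (h : p.isPrefixOf (c :: t) = false) : pvRep p r (c :: t) = c :: pvRep p r t := by
  simp [pvRep, h]

theorem pvRep_hit (p r : List Char) (c : Char) (t : List Char)
    (h : p.isPrefixOf (c :: t) = true) :
    pvRep p r (c :: t) = r ++ pvRep p r (t.drop (p.length - 1)) := by
  simp [pvRep, h]

theorem pvPre_head (d : Char) (p : List Char) (c : Char) (t : List Char) (h : c ≠ d) :
    (d :: p).isPrefixOf (c :: t) = false := by
  simp [List.isPrefixOf]
  intro hcd
  exact absurd hcd.symm h

theorem pvPre_second (c d : Char) (p : List Char) (t : List Char) (h : t.head? ≠ some d) :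
    (c :: d :: p).isPrefixOf (c :: t) = false := by
  cases t with
  | nil => simp [List.isPrefixOf]
  | cons e u =>
    simp at h
    simp [List.isPrefixOf]
    intro he
    exact absurd he.symm h

theorem pvPre_third (c d p3 : Char) (p : List Char) (t : List Char) (h : t.head? ≠ some p3) :
    (c :: d :: p3 :: p).isPrefixOf (c :: d :: t) = false := by
  cases t with
  | nil => simp [List.isPrefixOf]
  | cons e u =>
    simp at h
    simp [List.isPrefixOf]
    intro he
    exact absurd he.symm h

theorem pvRep_shape (p : List Char) (h : Char) (r' : List Char) (c : Char) (t : List Char) :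
    ∃ c' u, pvRep p (h :: r') (c :: t) = c' :: u ∧ (c' = c ∨ c' = h) := by
  by_cases hp : p.isPrefixOf (c :: t) = true
  · exact ⟨h, r' ++ pvRep p (h :: r') (t.drop (p.length - 1)), by rw [pvRep_hit _ _ _ _ hp]; simp, Or.inr rfl⟩
  · exact ⟨c, pvRep p (h :: r') t, by rw [pvRep_miss _ _ _ _ (Bool.eq_false_iff.mpr hp)], Or.inl rfl⟩

theorem pvStep3 (p2 : Char) (pr r : List Char) (z : List Char)
    (h1 : p2 ≠ '\'') (h2 : z.head? ≠ some p2) :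
    pvRep (' ' :: p2 :: pr) r (' ' :: '\'' :: ' ' :: z)
      = ' ' :: '\'' :: ' ' :: pvRep (' ' :: p2 :: pr) r z := by
  rw [pvRep_miss _ _ _ _ (pvPre_second _ _ _ _ (by simp; exact fun he => absurd he.symm h1))]
  rw [pvRep_miss _ _ _ _ (pvPre_head _ _ _ _ (by decide))]
  rw [pvRep_miss _ _ _ _ (pvPre_second _ _ _ _ h2)]

theorem pvStepQ (p2 : Char) (pr r : List Char) (e : Char) (z : List Char)
    (h1 : p2 ≠ '\'') (he : e ≠ ' ') :
    pvRep (' ' :: p2 :: pr) r (' ' :: '\'' :: e :: z)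
      = ' ' :: '\'' :: e :: pvRep (' ' :: p2 :: pr) r z := by
  rw [pvRep_miss _ _ _ _ (pvPre_second _ _ _ _ (by simp; exact fun h => absurd h.symm h1))]
  rw [pvRep_miss _ _ _ _ (pvPre_head _ _ _ _ (by decide))]
  rw [pvRep_miss _ _ _ _ (pvPre_head _ _ _ _ he)]

theorem pvC1_cons_ne (c : Char) (t : List Char) (hc : c ≠ ' ') :
    pvC1 (c :: t) = c :: pvC1 t := by
  simp only [pvC1]
  rw [pvRep_miss _ _ _ _ (pvPre_head _ _ _ _ hc),
      pvRep_miss _ _ _ _ (pvPre_head _ _ _ _ hc),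
      pvRep_miss _ _ _ _ (pvPre_head _ _ _ _ hc),
      pvRep_miss _ _ _ _ (pvPre_head _ _ _ _ hc),
      pvRep_miss _ _ _ _ (pvPre_head _ _ _ _ hc)]

theorem pvS1 : ∀ l, pvC1 l = pvScan1 l := by
  intro l
  induction l using pvScan1.induct
  case case1 t ih => simp only [pvC1] at ih; simp only [pvC1, pvScan1]; simp [pvRep]; exact ih
  case case2 t ih => simp only [pvC1] at ih; simp only [pvC1, pvScan1]; simp [pvRep]; exact ih
  case case3 t ih => simp only [pvC1] at ih; simp only [pvC1, pvScan1]; simp [pvRep]; exact ih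
  case case4 t ih => simp only [pvC1] at ih; simp only [pvC1, pvScan1]; simp [pvRep]; exact ih
  case case5 t ih => simp only [pvC1] at ih; simp only [pvC1, pvScan1]; simp [pvRep] at ih ⊢; exact ih
  case case6 t ih => simp only [pvC1] at ih; simp only [pvC1, pvScan1]; simp [pvRep] at ih ⊢; exact ih
  case case7 t ih => simp only [pvC1] at ih; simp only [pvC1, pvScan1]; simp [pvRep] at ih ⊢; exact ih
  case case8 t ih => simp only [pvC1] at ih; simp only [pvC1, pvScan1]; simp [pvRep] at ih ⊢; exact ih
  case case11 => simp [pvC1, pvRep, pvScan1]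
  case case9 t h1 h2 h3 h4 ih =>
    rw [pvScan1.eq_9 t h1 h2 h3 h4, ← ih]
    cases t with
    | nil => simp [pvC1, pvRep]
    | cons e u =>
      have he1 : e ≠ '.' := fun h => h1 u (by rw [h])
      have he2 : e ≠ '?' := fun h => h2 u (by rw [h])
      have he3 : e ≠ '!' := fun h => h3 u (by rw [h])
      have he4 : e ≠ ',' := fun h => h4 u (by rw [h])
      obtain ⟨c0, u0, s0, hc0⟩ := pvRep_shape [' ', '.'] '.' [] e u
      obtain ⟨c1, u1, s1, hc1⟩ := pvRep_shape [' ', '?'] '?' [] c0 u0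
      obtain ⟨c2, u2, s2, hc2⟩ := pvRep_shape [' ', '!'] '!' [] c1 u1
      obtain ⟨c3, u3, s3, hc3⟩ := pvRep_shape [' ', ','] ',' [] c2 u2
      simp only [pvC1]
      rw [pvStep3 '.' [] _ (e :: u) (by decide) (by simp [he1]), s0]
      rw [pvStep3 '?' [] _ (c0 :: u0) (by decide)
            (by simp; rcases hc0 with h | h <;> simp [h, he2]), s1]
      rw [pvStep3 '!' [] _ (c1 :: u1) (by decide)
            (by simp; rcases hc1 with h | h <;> rcases hc0 with h' | h' <;> simp_all), s2]
      rw [pvStep3 ',' [] _ (c2 :: u2) (by decide)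
            (by simp; rcases hc2 with h | h <;> rcases hc1 with h' | h' <;>
                rcases hc0 with h'' | h'' <;> simp_all), s3]
      rw [pvRep_hit _ _ _ _ (by simp [List.isPrefixOf])]
      simp only [List.length_cons]
      rw [← s3, ← s2, ← s1, ← s0]
      simp
  case case10 c t g1 g2 g3 g4 g5 g6 g7 g8 g9 ih =>
    rw [pvScan1.eq_10 c t g1 g2 g3 g4 g5 g6 g7 g8 g9, ← ih]
    by_cases hc : c = ' '
    case neg => exact pvC1_cons_ne c t hc
    case pos =>
      subst hc
      cases t with
      | nil => simp [pvC1, pvRep]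
      | cons d u =>
        by_cases hdq : d = '\''
        · subst hdq
          cases u with
          | nil => simp [pvC1, pvRep]
          | cons e w =>
            have he : e ≠ ' ' := fun h => g9 w rfl (by rw [h])
            conv_rhs => rw [pvC1_cons_ne '\'' (e :: w) (by decide), pvC1_cons_ne e w he]
            simp only [pvC1]
            rw [pvStepQ '.' [] _ e _ (by decide) he,
                pvStepQ '?' [] _ e _ (by decide) he,
                pvStepQ '!' [] _ e _ (by decide) he,
                pvStepQ ',' [] _ e _ (by decide) he]
            rw [pvRep_miss _ _ _ _ (pvPre_third _ _ _ _ _ (by simp [he]))]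
            rw [pvRep_miss _ _ _ _ (pvPre_head _ _ _ _ (by decide))]
            rw [pvRep_miss _ _ _ _ (pvPre_head _ _ _ _ he)]
        · have hd1 : d ≠ '.' := fun h => g1 u rfl (by rw [h])
          have hd2 : d ≠ '?' := fun h => g2 u rfl (by rw [h])
          have hd3 : d ≠ '!' := fun h => g3 u rfl (by rw [h])
          have hd4 : d ≠ ',' := fun h => g4 u rfl (by rw [h])
          have hd5 : d ≠ '\'' := hdq
          obtain ⟨c0, u0, s0, hc0⟩ := pvRep_shape [' ', '.'] '.' [] d u
          obtain ⟨c1, u1, s1, hc1⟩ := pvRep_shape [' ', '?'] '?' [] c0 u0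
          obtain ⟨c2, u2, s2, hc2⟩ := pvRep_shape [' ', '!'] '!' [] c1 u1
          obtain ⟨c3, u3, s3, hc3⟩ := pvRep_shape [' ', ','] ',' [] c2 u2
          have a2 : c0 ≠ '?' := by rcases hc0 with h | h <;> rw [h]; exact hd2; decide
          have a3 : c0 ≠ '!' := by rcases hc0 with h | h <;> rw [h]; exact hd3; decide
          have a4 : c0 ≠ ',' := by rcases hc0 with h | h <;> rw [h]; exact hd4; decide
          have a5 : c0 ≠ '\'' := by rcases hc0 with h | h <;> rw [h]; exact hd5; decide
          have b3 : c1 ≠ '!' := by rcases hc1 with h | h <;> rw [h]; exact a3; decide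
          have b4 : c1 ≠ ',' := by rcases hc1 with h | h <;> rw [h]; exact a4; decide
          have b5 : c1 ≠ '\'' := by rcases hc1 with h | h <;> rw [h]; exact a5; decide
          have d4 : c2 ≠ ',' := by rcases hc2 with h | h <;> rw [h]; exact b4; decide
          have d5 : c2 ≠ '\'' := by rcases hc2 with h | h <;> rw [h]; exact b5; decide
          have e5 : c3 ≠ '\'' := by rcases hc3 with h | h <;> rw [h]; exact d5; decide
          simp only [pvC1]
          rw [pvRep_miss _ _ _ _ (pvPre_second _ _ _ _ (by simp [hd1])), s0]
          rw [pvRep_miss _ _ _ _ (pvPre_second _ _ _ _ (by simp [a2])), s1]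
          rw [pvRep_miss _ _ _ _ (pvPre_second _ _ _ _ (by simp [b3])), s2]
          rw [pvRep_miss _ _ _ _ (pvPre_second _ _ _ _ (by simp [d4])), s3]
          rw [pvRep_miss _ _ _ _ (pvPre_second _ _ _ _ (by simp [e5]))]

theorem pvPre_fourth (c d e p4 : Char) (p : List Char) (t : List Char) (h : t.head? ≠ some p4) :
    (c :: d :: e :: p4 :: p).isPrefixOf (c :: d :: e :: t) = false := by
  cases t with
  | nil => simp [List.isPrefixOf]
  | cons f u =>
    simp at h
    simp [List.isPrefixOf]
    intro hf
    exact absurd hf.symm h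

theorem pvRep_ne_space (p' r : List Char) (c : Char) (t : List Char) (hc : c ≠ ' ') :
    pvRep (' ' :: p') r (c :: t) = c :: pvRep (' ' :: p') r t :=
  pvRep_miss _ _ _ _ (pvPre_head _ _ _ _ hc)

theorem pvRep_shape2 (p : List Char) (h1 h2 : Char) (r' : List Char) (c : Char) (t : List Char) :
    pvRep p (h1 :: h2 :: r') (c :: t) = c :: pvRep p (h1 :: h2 :: r') t ∨
      ∃ u, pvRep p (h1 :: h2 :: r') (c :: t) = h1 :: h2 :: u := by
  by_cases hp : p.isPrefixOf (c :: t) = true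
  · exact Or.inr ⟨r' ++ pvRep p (h1 :: h2 :: r') (t.drop (p.length - 1)),
      by rw [pvRep_hit _ _ _ _ hp]; simp⟩
  · exact Or.inl (pvRep_miss _ _ _ _ (Bool.eq_false_iff.mpr hp))

theorem pvC2_cons_ne (c : Char) (t : List Char) (hc : c ≠ ' ') :
    pvC2 (c :: t) = c :: pvC2 t := by
  simp only [pvC2]
  rw [pvRep_ne_space _ _ _ _ hc, pvRep_ne_space _ _ _ _ hc, pvRep_ne_space _ _ _ _ hc,
      pvRep_ne_space _ _ _ _ hc, pvRep_ne_space _ _ _ _ hc]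



theorem pvH5 (x : Char) (v : List Char) :
    (pvRep [' ', 'n', '\'', 't'] ['n', '\'', 't'] (x :: v)).head? = some x ∨
      (pvRep [' ', 'n', '\'', 't'] ['n', '\'', 't'] (x :: v)).head? = some 'n' := by
  rcases pvRep_shape2 [' ', 'n', '\'', 't'] 'n' '\'' ['t'] x v with h | ⟨z, h⟩ <;> rw [h] <;> simp

theorem pvH6 (x : Char) (v : List Char) :
    (pvRep [' ', '\'', 'm'] ['\'', 'm'] (pvRep [' ', 'n', '\'', 't'] ['n', '\'', 't'] (x :: v))).head? = some x ∨
      (pvRep [' ', '\'', 'm'] ['\'', 'm'] (pvRep [' ', 'n', '\'', 't'] ['n', '\'', 't'] (x :: v))).head? = some 'n' ∨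
      (pvRep [' ', '\'', 'm'] ['\'', 'm'] (pvRep [' ', 'n', '\'', 't'] ['n', '\'', 't'] (x :: v))).head? = some '\'' := by
  rcases pvRep_shape2 [' ', 'n', '\'', 't'] 'n' '\'' ['t'] x v with h | ⟨z, h⟩ <;> rw [h]
  · rcases pvRep_shape2 [' ', '\'', 'm'] '\'' 'm' [] x (pvRep [' ', 'n', '\'', 't'] ['n', '\'', 't'] v) with h2 | ⟨z2, h2⟩ <;> rw [h2] <;> simp
  · rw [pvRep_ne_space _ _ _ _ (by decide)]; simp

theorem pvRep_head_of (p : List Char) (h1 h2 : Char) (r' : List Char) (l : List Char) (a : Char)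
    (ha : l.head? = some a) :
    (pvRep p (h1 :: h2 :: r') l).head? = some a ∨ (pvRep p (h1 :: h2 :: r') l).head? = some h1 := by
  cases l with
  | nil => simp at ha
  | cons c t =>
    simp at ha
    subst ha
    rcases pvRep_shape2 p h1 h2 r' c t with h | ⟨z, h⟩ <;> rw [h] <;> simp

theorem pvH7 (x : Char) (v : List Char) :
    (pvRep [' ', '\'', 's'] ['\'', 's'] (pvRep [' ', '\'', 'm'] ['\'', 'm'] (pvRep [' ', 'n', '\'', 't'] ['n', '\'', 't'] (x :: v)))).head? = some x ∨
      (pvRep [' ', '\'', 's'] ['\'', 's'] (pvRep [' ', '\'', 'm'] ['\'', 'm'] (pvRep [' ', 'n', '\'', 't'] ['n', '\'', 't'] (x :: v)))).head? = some 'n' ∨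
      (pvRep [' ', '\'', 's'] ['\'', 's'] (pvRep [' ', '\'', 'm'] ['\'', 'm'] (pvRep [' ', 'n', '\'', 't'] ['n', '\'', 't'] (x :: v)))).head? = some '\'' := by
  rcases pvH6 x v with h | h | h <;>
    rcases pvRep_head_of [' ', '\'', 's'] '\'' 's' [] _ _ h with h' | h' <;> simp [h']

theorem pvH8 (x : Char) (v : List Char) :
    (pvRep [' ', '\'', 'v', 'e'] ['\'', 'v', 'e'] (pvRep [' ', '\'', 's'] ['\'', 's'] (pvRep [' ', '\'', 'm'] ['\'', 'm'] (pvRep [' ', 'n', '\'', 't'] ['n', '\'', 't'] (x :: v))))).head? = some x ∨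
      (pvRep [' ', '\'', 'v', 'e'] ['\'', 'v', 'e'] (pvRep [' ', '\'', 's'] ['\'', 's'] (pvRep [' ', '\'', 'm'] ['\'', 'm'] (pvRep [' ', 'n', '\'', 't'] ['n', '\'', 't'] (x :: v))))).head? = some 'n' ∨
      (pvRep [' ', '\'', 'v', 'e'] ['\'', 'v', 'e'] (pvRep [' ', '\'', 's'] ['\'', 's'] (pvRep [' ', '\'', 'm'] ['\'', 'm'] (pvRep [' ', 'n', '\'', 't'] ['n', '\'', 't'] (x :: v))))).head? = some '\'' := by
  rcases pvH7 x v with h | h | h <;>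
    rcases pvRep_head_of [' ', '\'', 'v', 'e'] '\'' 'v' ['e'] _ _ h with h' | h' <;> simp [h']

theorem pvS2 : ∀ l, pvC2 l = pvScan2 l := by
  intro l
  induction l using pvScan2.induct
  case case1 t ih => simp only [pvC2] at ih; simp only [pvC2, pvScan2]; simp [pvRep]; exact ih
  case case2 t ih => simp only [pvC2] at ih; simp only [pvC2, pvScan2]; simp [pvRep]; exact ih
  case case3 t ih => simp only [pvC2] at ih; simp only [pvC2, pvScan2]; simp [pvRep]; exact ih
  case case4 t ih => simp only [pvC2] at ih; simp only [pvC2, pvScan2]; simp [pvRep]; exact ih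
  case case5 t ih => simp only [pvC2] at ih; simp only [pvC2, pvScan2]; simp [pvRep]; exact ih
  case case7 => simp [pvC2, pvRep, pvScan2]
  case case6 c t g1 g2 g3 g4 g5 ih =>
    rw [pvScan2.eq_6 c t g1 g2 g3 g4 g5, ← ih]
    by_cases hc : c = ' '
    case neg => exact pvC2_cons_ne c t hc
    case pos =>
      subst hc
      cases t with
      | nil => simp [pvC2, pvRep]
      | cons d u =>
        by_cases hdn : d = 'n'
        · subst hdn
          cases u with
          | nil => simp [pvC2, pvRep]
          | cons x v =>
            by_cases hxq : x = '\''
            · subst hxq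
              have hv : v.head? ≠ some 't' := by
                cases v with
                | nil => simp
                | cons y w =>
                  simp
                  intro hy
                  exact g1 w rfl (by rw [hy])
              simp only [pvC2]
              rw [pvRep_miss [' ', 'n', '\'', 't'] ['n', '\'', 't'] ' ' _ (pvPre_fourth ' ' 'n' '\'' 't' [] v hv), pvRep_ne_space ['n', '\'', 't'] ['n', '\'', 't'] 'n' _ (by decide), pvRep_ne_space ['n', '\'', 't'] ['n', '\'', 't'] '\'' _ (by decide)]
              rw [pvRep_miss [' ', '\'', 'm'] ['\'', 'm'] ' ' _ (pvPre_second ' ' '\'' ['m'] _ (by simp)), pvRep_ne_space ['\'', 'm'] ['\'', 'm'] 'n' _ (by decide), pvRep_ne_space ['\'', 'm'] ['\'', 'm'] '\'' _ (by decide)]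
              rw [pvRep_miss [' ', '\'', 's'] ['\'', 's'] ' ' _ (pvPre_second ' ' '\'' ['s'] _ (by simp)), pvRep_ne_space ['\'', 's'] ['\'', 's'] 'n' _ (by decide), pvRep_ne_space ['\'', 's'] ['\'', 's'] '\'' _ (by decide)]
              rw [pvRep_miss [' ', '\'', 'v', 'e'] ['\'', 'v', 'e'] ' ' _ (pvPre_second ' ' '\'' ['v', 'e'] _ (by simp)), pvRep_ne_space ['\'', 'v', 'e'] ['\'', 'v', 'e'] 'n' _ (by decide), pvRep_ne_space ['\'', 'v', 'e'] ['\'', 'v', 'e'] '\'' _ (by decide)]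
              rw [pvRep_miss [' ', '\'', 'r', 'e'] ['\'', 'r', 'e'] ' ' _ (pvPre_second ' ' '\'' ['r', 'e'] _ (by simp)), pvRep_ne_space ['\'', 'r', 'e'] ['\'', 'r', 'e'] 'n' _ (by decide), pvRep_ne_space ['\'', 'r', 'e'] ['\'', 'r', 'e'] '\'' _ (by decide)]
            · simp only [pvC2]
              rw [pvRep_miss [' ', 'n', '\'', 't'] ['n', '\'', 't'] ' ' _ (pvPre_third ' ' 'n' '\'' ['t'] _ (by simp [hxq])), pvRep_ne_space ['n', '\'', 't'] ['n', '\'', 't'] 'n' _ (by decide)]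
              rw [pvRep_miss [' ', '\'', 'm'] ['\'', 'm'] ' ' _ (pvPre_second ' ' '\'' ['m'] _ (by simp)), pvRep_ne_space ['\'', 'm'] ['\'', 'm'] 'n' _ (by decide)]
              rw [pvRep_miss [' ', '\'', 's'] ['\'', 's'] ' ' _ (pvPre_second ' ' '\'' ['s'] _ (by simp)), pvRep_ne_space ['\'', 's'] ['\'', 's'] 'n' _ (by decide)]
              rw [pvRep_miss [' ', '\'', 'v', 'e'] ['\'', 'v', 'e'] ' ' _ (pvPre_second ' ' '\'' ['v', 'e'] _ (by simp)), pvRep_ne_space ['\'', 'v', 'e'] ['\'', 'v', 'e'] 'n' _ (by decide)]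
              rw [pvRep_miss [' ', '\'', 'r', 'e'] ['\'', 'r', 'e'] ' ' _ (pvPre_second ' ' '\'' ['r', 'e'] _ (by simp)), pvRep_ne_space ['\'', 'r', 'e'] ['\'', 'r', 'e'] 'n' _ (by decide)]
        · by_cases hdq : d = '\''
          · subst hdq
            cases u with
            | nil => simp [pvC2, pvRep]
            | cons x v =>
              have hx1 : x ≠ 'm' := fun h => g2 v rfl (by rw [h])
              have hx2 : x ≠ 's' := fun h => g3 v rfl (by rw [h])
              simp only [pvC2]
              rw [pvRep_miss [' ', 'n', '\'', 't'] ['n', '\'', 't'] ' ' _ (pvPre_second ' ' 'n' ['\'', 't'] _ (by simp)), pvRep_ne_space ['n', '\'', 't'] ['n', '\'', 't'] '\'' _ (by decide)]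
              by_cases hxv : x = 'v'
              · subst hxv
                have hv : v.head? ≠ some 'e' := by
                  cases v with
                  | nil => simp
                  | cons y w =>
                    simp
                    intro hy
                    exact g4 w rfl (by rw [hy])
                have h8 : (pvRep [' ', '\'', 's'] ['\'', 's'] (pvRep [' ', '\'', 'm'] ['\'', 'm'] (pvRep [' ', 'n', '\'', 't'] ['n', '\'', 't'] (v)))).head? ≠ some 'e' := by
                  cases v with
                  | nil => simp [pvRep]
                  | cons y w =>
                    have hy : y ≠ 'e' := by simpa using hv
                    rcases pvH7 y w with h | h | h <;> rw [h] <;> simp [hy]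
                rw [pvRep_ne_space ['n', '\'', 't'] ['n', '\'', 't'] 'v' _ (by decide)]
                rw [pvRep_miss [' ', '\'', 'm'] ['\'', 'm'] ' ' _ (pvPre_third ' ' '\'' 'm' [] _ (by simp)), pvRep_ne_space ['\'', 'm'] ['\'', 'm'] '\'' _ (by decide), pvRep_ne_space ['\'', 'm'] ['\'', 'm'] 'v' _ (by decide)]
                rw [pvRep_miss [' ', '\'', 's'] ['\'', 's'] ' ' _ (pvPre_third ' ' '\'' 's' [] _ (by simp)), pvRep_ne_space ['\'', 's'] ['\'', 's'] '\'' _ (by decide), pvRep_ne_space ['\'', 's'] ['\'', 's'] 'v' _ (by decide)]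
                rw [pvRep_miss [' ', '\'', 'v', 'e'] ['\'', 'v', 'e'] ' ' _ (pvPre_fourth ' ' '\'' 'v' 'e' [] _ h8), pvRep_ne_space ['\'', 'v', 'e'] ['\'', 'v', 'e'] '\'' _ (by decide), pvRep_ne_space ['\'', 'v', 'e'] ['\'', 'v', 'e'] 'v' _ (by decide)]
                rw [pvRep_miss [' ', '\'', 'r', 'e'] ['\'', 'r', 'e'] ' ' _ (pvPre_third ' ' '\'' 'r' ['e'] _ (by simp)), pvRep_ne_space ['\'', 'r', 'e'] ['\'', 'r', 'e'] '\'' _ (by decide), pvRep_ne_space ['\'', 'r', 'e'] ['\'', 'r', 'e'] 'v' _ (by decide)]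
              · by_cases hxr : x = 'r'
                · subst hxr
                  have hv : v.head? ≠ some 'e' := by
                    cases v with
                    | nil => simp
                    | cons y w =>
                      simp
                      intro hy
                      exact g5 w rfl (by rw [hy])
                  have h9 : (pvRep [' ', '\'', 'v', 'e'] ['\'', 'v', 'e'] (pvRep [' ', '\'', 's'] ['\'', 's'] (pvRep [' ', '\'', 'm'] ['\'', 'm'] (pvRep [' ', 'n', '\'', 't'] ['n', '\'', 't'] (v))))).head? ≠ some 'e' := by
                    cases v with
                    | nil => simp [pvRep]
                    | cons y w =>
                      have hy : y ≠ 'e' := by simpa using hv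
                      rcases pvH8 y w with h | h | h <;> rw [h] <;> simp [hy]
                  rw [pvRep_ne_space ['n', '\'', 't'] ['n', '\'', 't'] 'r' _ (by decide)]
                  rw [pvRep_miss [' ', '\'', 'm'] ['\'', 'm'] ' ' _ (pvPre_third ' ' '\'' 'm' [] _ (by simp)), pvRep_ne_space ['\'', 'm'] ['\'', 'm'] '\'' _ (by decide), pvRep_ne_space ['\'', 'm'] ['\'', 'm'] 'r' _ (by decide)]
                  rw [pvRep_miss [' ', '\'', 's'] ['\'', 's'] ' ' _ (pvPre_third ' ' '\'' 's' [] _ (by simp)), pvRep_ne_space ['\'', 's'] ['\'', 's'] '\'' _ (by decide), pvRep_ne_space ['\'', 's'] ['\'', 's'] 'r' _ (by decide)]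
                  rw [pvRep_miss [' ', '\'', 'v', 'e'] ['\'', 'v', 'e'] ' ' _ (pvPre_third ' ' '\'' 'v' ['e'] _ (by simp)), pvRep_ne_space ['\'', 'v', 'e'] ['\'', 'v', 'e'] '\'' _ (by decide), pvRep_ne_space ['\'', 'v', 'e'] ['\'', 'v', 'e'] 'r' _ (by decide)]
                  rw [pvRep_miss [' ', '\'', 'r', 'e'] ['\'', 'r', 'e'] ' ' _ (pvPre_fourth ' ' '\'' 'r' 'e' [] _ h9), pvRep_ne_space ['\'', 'r', 'e'] ['\'', 'r', 'e'] '\'' _ (by decide), pvRep_ne_space ['\'', 'r', 'e'] ['\'', 'r', 'e'] 'r' _ (by decide)]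
                · rw [pvRep_miss [' ', '\'', 'm'] ['\'', 'm'] ' ' _ (pvPre_third ' ' '\'' 'm' [] _ (by rcases pvH5 x v with h | h <;> rw [h] <;> simp [hx1])), pvRep_ne_space ['\'', 'm'] ['\'', 'm'] '\'' _ (by decide)]
                  rw [pvRep_miss [' ', '\'', 's'] ['\'', 's'] ' ' _ (pvPre_third ' ' '\'' 's' [] _ (by rcases pvH6 x v with h | h | h <;> rw [h] <;> simp [hx2])), pvRep_ne_space ['\'', 's'] ['\'', 's'] '\'' _ (by decide)]
                  rw [pvRep_miss [' ', '\'', 'v', 'e'] ['\'', 'v', 'e'] ' ' _ (pvPre_third ' ' '\'' 'v' ['e'] _ (by rcases pvH7 x v with h | h | h <;> rw [h] <;> simp [hxv])), pvRep_ne_space ['\'', 'v', 'e'] ['\'', 'v', 'e'] '\'' _ (by decide)]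
                  rw [pvRep_miss [' ', '\'', 'r', 'e'] ['\'', 'r', 'e'] ' ' _ (pvPre_third ' ' '\'' 'r' ['e'] _ (by rcases pvH8 x v with h | h | h <;> rw [h] <;> simp [hxr])), pvRep_ne_space ['\'', 'r', 'e'] ['\'', 'r', 'e'] '\'' _ (by decide)]
          · by_cases hds : d = ' '
            · subst hds
              simp only [pvC2]
              rw [pvRep_miss [' ', 'n', '\'', 't'] ['n', '\'', 't'] ' ' _ (pvPre_second ' ' 'n' ['\'', 't'] _ (by simp))]
              rw [pvRep_miss [' ', '\'', 'm'] ['\'', 'm'] ' ' _ (pvPre_second ' ' '\'' ['m'] _ (by rcases pvRep_shape2 [' ', 'n', '\'', 't'] 'n' '\'' ['t'] ' ' u with h | ⟨z, h⟩ <;> rw [h] <;> simp))]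
              rw [pvRep_miss [' ', '\'', 's'] ['\'', 's'] ' ' _ (show ([' ', '\'', 's'].isPrefixOf (' ' :: pvRep [' ', '\'', 'm'] ['\'', 'm'] (pvRep [' ', 'n', '\'', 't'] ['n', '\'', 't'] (' ' :: u)))) = false by
                    rcases pvRep_shape2 [' ', 'n', '\'', 't'] 'n' '\'' ['t'] ' ' u with h | ⟨z, h⟩ <;> rw [h]
                    · rcases pvRep_shape2 [' ', '\'', 'm'] '\'' 'm' [] ' ' (pvRep [' ', 'n', '\'', 't'] ['n', '\'', 't'] (u)) with h2 | ⟨z2, h2⟩ <;> rw [h2] <;> simp [List.isPrefixOf]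
                    · rw [pvRep_ne_space ['\'', 'm'] ['\'', 'm'] 'n' _ (by decide)]
                      simp [List.isPrefixOf])]
              rw [pvRep_miss [' ', '\'', 'v', 'e'] ['\'', 'v', 'e'] ' ' _ (show ([' ', '\'', 'v', 'e'].isPrefixOf (' ' :: pvRep [' ', '\'', 's'] ['\'', 's'] (pvRep [' ', '\'', 'm'] ['\'', 'm'] (pvRep [' ', 'n', '\'', 't'] ['n', '\'', 't'] (' ' :: u))))) = false by
                    rcases pvRep_shape2 [' ', 'n', '\'', 't'] 'n' '\'' ['t'] ' ' u with h | ⟨z, h⟩ <;> rw [h]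
                    · rcases pvRep_shape2 [' ', '\'', 'm'] '\'' 'm' [] ' ' (pvRep [' ', 'n', '\'', 't'] ['n', '\'', 't'] (u)) with h2 | ⟨z2, h2⟩ <;> rw [h2]
                      · rcases pvRep_shape2 [' ', '\'', 's'] '\'' 's' [] ' ' (pvRep [' ', '\'', 'm'] ['\'', 'm'] (pvRep [' ', 'n', '\'', 't'] ['n', '\'', 't'] (u))) with h3 | ⟨z3, h3⟩ <;> rw [h3] <;> simp [List.isPrefixOf]
                      · rw [pvRep_ne_space ['\'', 's'] ['\'', 's'] '\'' _ (by decide), pvRep_ne_space ['\'', 's'] ['\'', 's'] 'm' _ (by decide)]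
                        simp [List.isPrefixOf]
                    · rw [pvRep_ne_space ['\'', 'm'] ['\'', 'm'] 'n' _ (by decide), pvRep_ne_space ['\'', 's'] ['\'', 's'] 'n' _ (by decide)]
                      simp [List.isPrefixOf])]
              rw [pvRep_miss [' ', '\'', 'r', 'e'] ['\'', 'r', 'e'] ' ' _ (show ([' ', '\'', 'r', 'e'].isPrefixOf (' ' :: pvRep [' ', '\'', 'v', 'e'] ['\'', 'v', 'e'] (pvRep [' ', '\'', 's'] ['\'', 's'] (pvRep [' ', '\'', 'm'] ['\'', 'm'] (pvRep [' ', 'n', '\'', 't'] ['n', '\'', 't'] (' ' :: u)))))) = false by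
                    rcases pvRep_shape2 [' ', 'n', '\'', 't'] 'n' '\'' ['t'] ' ' u with h | ⟨z, h⟩ <;> rw [h]
                    · rcases pvRep_shape2 [' ', '\'', 'm'] '\'' 'm' [] ' ' (pvRep [' ', 'n', '\'', 't'] ['n', '\'', 't'] (u)) with h2 | ⟨z2, h2⟩ <;> rw [h2]
                      · rcases pvRep_shape2 [' ', '\'', 's'] '\'' 's' [] ' ' (pvRep [' ', '\'', 'm'] ['\'', 'm'] (pvRep [' ', 'n', '\'', 't'] ['n', '\'', 't'] (u))) with h3 | ⟨z3, h3⟩ <;> rw [h3]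
                        · rcases pvRep_shape2 [' ', '\'', 'v', 'e'] '\'' 'v' ['e'] ' ' (pvRep [' ', '\'', 's'] ['\'', 's'] (pvRep [' ', '\'', 'm'] ['\'', 'm'] (pvRep [' ', 'n', '\'', 't'] ['n', '\'', 't'] (u)))) with h4 | ⟨z4, h4⟩ <;> rw [h4] <;> simp [List.isPrefixOf]
                        · rw [pvRep_ne_space ['\'', 'v', 'e'] ['\'', 'v', 'e'] '\'' _ (by decide), pvRep_ne_space ['\'', 'v', 'e'] ['\'', 'v', 'e'] 's' _ (by decide)]
                          simp [List.isPrefixOf]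
                      · rw [pvRep_ne_space ['\'', 's'] ['\'', 's'] '\'' _ (by decide), pvRep_ne_space ['\'', 's'] ['\'', 's'] 'm' _ (by decide), pvRep_ne_space ['\'', 'v', 'e'] ['\'', 'v', 'e'] '\'' _ (by decide), pvRep_ne_space ['\'', 'v', 'e'] ['\'', 'v', 'e'] 'm' _ (by decide)]
                        simp [List.isPrefixOf]
                    · rw [pvRep_ne_space ['\'', 'm'] ['\'', 'm'] 'n' _ (by decide), pvRep_ne_space ['\'', 's'] ['\'', 's'] 'n' _ (by decide), pvRep_ne_space ['\'', 'v', 'e'] ['\'', 'v', 'e'] 'n' _ (by decide)]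
                      simp [List.isPrefixOf])]
            · simp only [pvC2]
              rw [pvRep_miss [' ', 'n', '\'', 't'] ['n', '\'', 't'] ' ' _ (pvPre_second ' ' 'n' ['\'', 't'] _ (by simp [hdn])), pvRep_ne_space ['n', '\'', 't'] ['n', '\'', 't'] d _ hds]
              rw [pvRep_miss [' ', '\'', 'm'] ['\'', 'm'] ' ' _ (pvPre_second ' ' '\'' ['m'] _ (by simp [hdq])), pvRep_ne_space ['\'', 'm'] ['\'', 'm'] d _ hds]
              rw [pvRep_miss [' ', '\'', 's'] ['\'', 's'] ' ' _ (pvPre_second ' ' '\'' ['s'] _ (by simp [hdq])), pvRep_ne_space ['\'', 's'] ['\'', 's'] d _ hds]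
              rw [pvRep_miss [' ', '\'', 'v', 'e'] ['\'', 'v', 'e'] ' ' _ (pvPre_second ' ' '\'' ['v', 'e'] _ (by simp [hdq])), pvRep_ne_space ['\'', 'v', 'e'] ['\'', 'v', 'e'] d _ hds]
              rw [pvRep_miss [' ', '\'', 'r', 'e'] ['\'', 'r', 'e'] ' ' _ (pvPre_second ' ' '\'' ['r', 'e'] _ (by simp [hdq])), pvRep_ne_space ['\'', 'r', 'e'] ['\'', 'r', 'e'] d _ hds]


theorem pvStrExt (a b : String) (h : a.toList = b.toList) : a = b := by
  calc a = String.ofList a.toList := String.ofList_toList.symm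
    _ = String.ofList b.toList := by rw [h]
    _ = b := String.ofList_toList

-- ===== VERDICT (by name: the statement is the Claim_ definition above) =====
theorem clean_unnecessary_spaces_spec : Claim_equal_clean_unnecessary_spaces := by
  intro s _
  unfold Spec_clean_unnecessary_spaces clean_unnecessary_spaces clean_unnecessary_spaces_alt
  have hr : PySem.List.pyRange 0 ((10 : Nat) : Int) 1 = [0, 1, 2, 3, 4, 5, 6, 7, 8, 9] := by decide
  simp only [List.length_cons, List.length_nil, hr, List.foldl_cons, List.foldl_nil]
  apply pvStrExt
  simp only [PySem.Str.toList_replace, String.toList_ofList]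
  norm_num [PySem.List.pyGetD_ofNat']
  rw [pvRepEq _ _ (by decide), pvRepEq _ _ (by decide), pvRepEq _ _ (by decide),
      pvRepEq _ _ (by decide), pvRepEq _ _ (by decide), pvRepEq _ _ (by decide),
      pvRepEq _ _ (by decide), pvRepEq _ _ (by decide), pvRepEq _ _ (by decide),
      pvRepEq _ _ (by decide)]
  show pvC2 (pvC1 s.toList) = pvScan2 (pvScan1 s.toList)
  rw [pvS1, pvS2]
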